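-- pv_equiv track=rewrite | github.com/mhbrk/disc-site | breba_app/search_replace_editing.py | replace_part_with_missing_leading_whitespace
-- ===== SOURCE A (Python) =====
-- def match_but_for_leading_whitespace(whole_lines, part_lines):
--     num = len(whole_lines)
--
--     # does the non-whitespace all agree?
--     if not all(whole_lines[i].lstrip() == part_lines[i].lstrip() for i in range(num)):
--         return
--
--     # are they all offset the same?
--     add = set(
--         whole_lines[i][: len(whole_lines[i]) - len(part_lines[i])]
--         for i in range(num)
--         if whole_lines[i].strip()
--     )
--
--     if len(add) != 1:
--         return
--
--     return add.pop()
--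
-- def replace_part_with_missing_leading_whitespace(whole_lines, part_lines, replace_lines):
--     # GPT often messes up leading whitespace.
--     # It usually does it uniformly across the ORIG and UPD blocks.
--     # Either omitting all leading whitespace, or including only some of it.
--
--     # Outdent everything in part_lines and replace_lines by the max fixed amount possible
--     leading = [len(p) - len(p.lstrip()) for p in part_lines if p.strip()] + [
--         len(p) - len(p.lstrip()) for p in replace_lines if p.strip()
--     ]
--
--     if leading and min(leading):
--         num_leading = min(leading)
--         part_lines = [p[num_leading:] if p.strip() else p for p in part_lines]
--         replace_lines = [p[num_leading:] if p.strip() else p for p in replace_lines]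
--
--     # can we find an exact match not including the leading whitespace
--     num_part_lines = len(part_lines)
--
--     for i in range(len(whole_lines) - num_part_lines + 1):
--         add_leading = match_but_for_leading_whitespace(
--             whole_lines[i: i + num_part_lines], part_lines
--         )
--
--         if add_leading is None:
--             continue
--
--         replace_lines = [add_leading + rline if rline.strip() else rline for rline in replace_lines]
--         whole_lines = whole_lines[:i] + replace_lines + whole_lines[i + num_part_lines:]
--         return "".join(whole_lines)
--
--     return None
-- ===== SOURCE B (Python) =====
-- def replace_part_with_missing_leading_whitespace(whole_lines, part_lines, replace_lines):
--     # Outdent part/replace by the common fixed indent, as the task requires.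
--     lead = [len(p) - len(p.lstrip()) for p in part_lines + replace_lines if p.strip()]
--     k = min(lead, default=0)
--     if k:
--         part_lines = [p[k:] if p.strip() else p for p in part_lines]
--         replace_lines = [p[k:] if p.strip() else p for p in replace_lines]
--
--     m = len(part_lines)
--     n = len(whole_lines)
--     if m == 0 or m > n:
--         # an empty pattern carries no indentation evidence; no window can match
--         return None
--
--     # lstrip every line ONCE, then index whole-line positions by their stripped text:
--     # only positions whose stripped line equals the pattern's first stripped line
--     # are candidate window starts.
--     sp = [p.lstrip() for p in part_lines]
--     sw = [w.lstrip() for w in whole_lines]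
--     index = {}
--     for i, s in enumerate(sw):
--         index.setdefault(s, []).append(i)
--
--     for i in index.get(sp[0], []):
--         if i + m > n:
--             continue
--         if sw[i + 1:i + m] != sp[1:]:
--             continue
--         # single fused pass: the leading-whitespace surplus must be uniform
--         # over the non-blank lines of the window
--         add = None
--         ok = True
--         for j in range(m):
--             if not sw[i + j]:
--                 continue
--             w = whole_lines[i + j]
--             pre = w[:len(w) - len(part_lines[j])]
--             if add is None:
--                 add = pre
--             elif add != pre:
--                 ok = False
--                 break
--         if not ok or add is None:
--             continue
--         rep = [add + r if r.strip() else r for r in replace_lines]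
--         return "".join(whole_lines[:i] + rep + whole_lines[i + m:])
--     return None
-- ===== Notes on version B (the rewrite author's own statement) =====
-- stated objective: alternative
-- what changed: B lstrips every whole-line once up front, builds a dict from stripped line text to its positions so only windows whose first stripped line matches the pattern's are examined, and verifies each candidate with one fused early-exit pass that tracks the single leading-whitespace prefix, instead of A's re-lstripping of every window and set-building per window.
import Mathlib
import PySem

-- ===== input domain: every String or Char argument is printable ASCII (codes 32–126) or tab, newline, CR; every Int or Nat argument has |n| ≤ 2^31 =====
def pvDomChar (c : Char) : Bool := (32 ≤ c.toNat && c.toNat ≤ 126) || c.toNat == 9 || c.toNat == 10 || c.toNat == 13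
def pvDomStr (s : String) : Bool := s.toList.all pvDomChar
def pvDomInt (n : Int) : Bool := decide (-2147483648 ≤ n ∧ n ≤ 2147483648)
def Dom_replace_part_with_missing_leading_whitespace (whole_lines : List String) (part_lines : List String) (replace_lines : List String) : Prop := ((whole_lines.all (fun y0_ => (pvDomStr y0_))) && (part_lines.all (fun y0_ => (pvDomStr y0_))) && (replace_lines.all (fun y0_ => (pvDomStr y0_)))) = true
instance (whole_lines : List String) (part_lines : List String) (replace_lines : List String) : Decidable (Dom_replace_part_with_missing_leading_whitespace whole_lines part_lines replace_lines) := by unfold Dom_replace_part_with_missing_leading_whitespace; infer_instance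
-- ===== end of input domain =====

-- B replaces A's per-window re-lstripping scan by: lstrip every line once, index window
-- starts by their stripped first line in a dict, and verify each candidate with one fused
-- early-exit pass; objective: alternative algorithm, same return value everywhere.

-- ===== PORT A =====
-- helper match_but_for_leading_whitespace, transliterated
def pvMatchA (wl pl : List String) : Option String :=
  let num : Int := (wl.length : Int)
  if !((PySem.List.pyRange 0 num 1).all (fun i =>
      PySem.Str.lstrip (PySem.List.pyGetD wl i "") == PySem.Str.lstrip (PySem.List.pyGetD pl i ""))) then
    none
  else
    let add : PySem.Set String := PySem.Set.ofList
      (((PySem.List.pyRange 0 num 1).filter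
          (fun i => !(PySem.Str.strip (PySem.List.pyGetD wl i "") == ""))).map
        (fun i => PySem.Str.slice (PySem.List.pyGetD wl i "") none
            (some (PySem.Str.len (PySem.List.pyGetD wl i "")
                   - PySem.Str.len (PySem.List.pyGetD pl i "")))))
    if add.length ≠ 1 then none
    else add.head?   -- add.pop() of the singleton set

-- the 'for i in range(...)' search loop of A, with its early return
def pvLoopA (whole part repl : List String) : List Int → Option String
  | [] => none
  | i :: rest =>
    match pvMatchA (PySem.List.slice whole (some i) (some (i + (part.length : Int)))) part with
    | none => pvLoopA whole part repl rest
    | some add =>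
      some (PySem.Str.join ""
        (PySem.List.slice whole none (some i)
          ++ repl.map (fun r => if !(PySem.Str.strip r == "") then PySem.Str.join "" [add, r] else r)
          ++ PySem.List.slice whole (some (i + (part.length : Int))) none))

def replace_part_with_missing_leading_whitespace (whole_lines : List String) (part_lines : List String) (replace_lines : List String) : Option String :=
  let leading : List Int :=
    (part_lines.filter (fun p => !(PySem.Str.strip p == ""))).map
        (fun p => PySem.Str.len p - PySem.Str.len (PySem.Str.lstrip p))
    ++ (replace_lines.filter (fun p => !(PySem.Str.strip p == ""))).map
        (fun p => PySem.Str.len p - PySem.Str.len (PySem.Str.lstrip p))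
  let pr : List String × List String :=
    match PySem.List.min? leading (fun x => x) with
    | none => (part_lines, replace_lines)
    | some nl =>
      if nl ≠ 0 then
        (part_lines.map (fun p => if !(PySem.Str.strip p == "") then PySem.Str.slice p (some nl) none else p),
         replace_lines.map (fun p => if !(PySem.Str.strip p == "") then PySem.Str.slice p (some nl) none else p))
      else (part_lines, replace_lines)
  pvLoopA whole_lines pr.1 pr.2
    (PySem.List.pyRange 0 ((whole_lines.length : Int) - (pr.1.length : Int) + 1) 1)

-- ===== PORT B =====
-- the fused per-window pass of B (for j in range(m): … with add accumulator and break)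
def pvScanB (whole part2 sw : List String) (i : Int) : List Int → Option String → Option String
  | [], add => add
  | j :: rest, add =>
    if PySem.List.pyGetD sw (i + j) "" == "" then pvScanB whole part2 sw i rest add
    else
      let w := PySem.List.pyGetD whole (i + j) ""
      let pre := PySem.Str.slice w none
        (some (PySem.Str.len w - PySem.Str.len (PySem.List.pyGetD part2 j "")))
      match add with
      | none => pvScanB whole part2 sw i rest (some pre)
      | some a => if a == pre then pvScanB whole part2 sw i rest (some a) else none

-- B's loop over the candidate positions taken from the index
def pvLoopB (whole part2 repl2 sp sw : List String) (m n : Nat) : List Int → Option String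
  | [] => none
  | i :: rest =>
    if i + (m : Int) > (n : Int) then pvLoopB whole part2 repl2 sp sw m n rest
    else if !(PySem.List.slice sw (some (i + 1)) (some (i + (m : Int))) == PySem.List.slice sp (some 1) none) then
      pvLoopB whole part2 repl2 sp sw m n rest
    else
      match pvScanB whole part2 sw i (PySem.List.pyRange 0 (m : Int) 1) none with
      | none => pvLoopB whole part2 repl2 sp sw m n rest
      | some add =>
        some (PySem.Str.join ""
          (PySem.List.slice whole none (some i)
            ++ repl2.map (fun r => if !(PySem.Str.strip r == "") then PySem.Str.join "" [add, r] else r)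
            ++ PySem.List.slice whole (some (i + (m : Int))) none))

def replace_part_with_missing_leading_whitespace_alt (whole_lines : List String) (part_lines : List String) (replace_lines : List String) : Option String :=
  let lead : List Int :=
    ((part_lines ++ replace_lines).filter (fun p => !(PySem.Str.strip p == ""))).map
      (fun p => PySem.Str.len p - PySem.Str.len (PySem.Str.lstrip p))
  let k : Int := match PySem.List.min? lead (fun x => x) with | some v => v | none => 0
  let part2 := if k ≠ 0 then part_lines.map (fun p => if !(PySem.Str.strip p == "") then PySem.Str.slice p (some k) none else p) else part_lines
  let repl2 := if k ≠ 0 then replace_lines.map (fun p => if !(PySem.Str.strip p == "") then PySem.Str.slice p (some k) none else p) else replace_lines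
  let m : Nat := part2.length
  let n : Nat := whole_lines.length
  if m == 0 || m > n then none
  else
    let sp := part2.map (fun p => PySem.Str.lstrip p)
    let sw := whole_lines.map (fun w => PySem.Str.lstrip w)
    let index : PySem.Dict String (List Int) :=
      (PySem.List.enumerate sw 0).foldl (fun d p => d.modify p.2 [] (· ++ [p.1])) PySem.Dict.empty
    pvLoopB whole_lines part2 repl2 sp sw m n
      (index.getD (PySem.List.pyGetD sp 0 "") [])

-- ===== PRECONDITION & SPEC =====
def Spec_replace_part_with_missing_leading_whitespace (whole_lines : List String) (part_lines : List String) (replace_lines : List String) (out : Option String) : Prop := out = replace_part_with_missing_leading_whitespace_alt whole_lines part_lines replace_lines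
instance (whole_lines : List String) (part_lines : List String) (replace_lines : List String) (out : Option String) : Decidable (Spec_replace_part_with_missing_leading_whitespace whole_lines part_lines replace_lines out) := by unfold Spec_replace_part_with_missing_leading_whitespace; infer_instance

-- ===== CLAIM (what is proved, stated in full; the proofs are below) =====
def Claim_equal_replace_part_with_missing_leading_whitespace : Prop := ∀ (whole_lines : List String) (part_lines : List String) (replace_lines : List String), Dom_replace_part_with_missing_leading_whitespace whole_lines part_lines replace_lines → Spec_replace_part_with_missing_leading_whitespace whole_lines part_lines replace_lines (replace_part_with_missing_leading_whitespace whole_lines part_lines replace_lines)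

-- ===== LEMMAS AND PROOFS =====

-- truthiness of s.strip() equals truthiness of s.lstrip()
lemma pv_strip_empty (s : String) : (PySem.Str.strip s == "") = (PySem.Str.lstrip s == "") := by
  have hofl : ∀ l : List Char, (String.ofList l = "") ↔ l = [] := by
    intro l
    constructor
    · intro h
      have := congrArg String.toList h
      simpa using this
    · rintro rfl; rfl
  rw [Bool.eq_iff_iff]
  simp only [beq_iff_eq, PySem.Str.strip, PySem.Str.lstrip, PySem.Chars.strip,
    PySem.Chars.rstrip, PySem.Chars.lstrip, hofl]
  rw [List.reverse_eq_nil_iff, List.dropWhile_eq_nil_iff, List.dropWhile_eq_nil_iff]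
  constructor
  · intro h x hx
    rw [← List.takeWhile_append_dropWhile (p := PySem.Chars.isspace) (l := s.toList)] at hx
    rcases List.mem_append.1 hx with h1 | h2
    · exact List.mem_takeWhile_imp h1
    · exact h x (List.mem_reverse.2 h2)
  · intro h x hx
    exact h x ((List.dropWhile_sublist _).mem (List.mem_reverse.1 hx))

-- the accumulator fold underlying pvScanB, on the list of prefixes it actually visits
def pvAllEq : List String → Option String → Option String
  | [], acc => acc
  | x :: rest, none => pvAllEq rest (some x)
  | x :: rest, some a => if a == x then pvAllEq rest (some a) else none

lemma pvAllEq_some (t : List String) (a : String) :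
    pvAllEq t (some a) = if t.all (· == a) then some a else none := by
  induction t with
  | nil => simp [pvAllEq]
  | cons x t ih =>
    by_cases h : a = x
    · subst h
      simp [pvAllEq, ih]
    · simp [pvAllEq, beq_iff_eq, h, Ne.symm h]

lemma pvAllEq_set (l : List String) :
    pvAllEq l none
      = if (PySem.Set.ofList l).length ≠ 1 then none else (PySem.Set.ofList l).head? := by
  cases l with
  | nil => decide
  | cons x t =>
    have hmem := PySem.Set.mem_ofList (x :: t)
    have hnd := PySem.Set.nodup_ofList (x :: t)
    by_cases hall : ∀ y ∈ t, y = x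
    · have hone : PySem.Set.ofList (x :: t) = [x] := by
        cases hS : PySem.Set.ofList (x :: t) with
        | nil =>
          exact absurd ((hmem x).2 (by simp)) (by simp [hS])
        | cons z r =>
          have hz : z = x := by
            have := (hmem z).1 (by simp [hS])
            rcases List.mem_cons.1 this with h | h
            · exact h
            · exact hall z h
          have hr : r = [] := by
            rw [List.eq_nil_iff_forall_not_mem]
            intro y hy
            have hyx : y = x := by
              have := (hmem y).1 (by simp [hS, hy])
              rcases List.mem_cons.1 this with h | h
              · exact h
              · exact hall y h
            rw [hS] at hnd
            exact (List.nodup_cons.1 hnd).1 ((hyx.trans hz.symm) ▸ hy)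
          rw [hz, hr]
      show pvAllEq t (some x) = _
      rw [pvAllEq_some, hone]
      simp only [List.all_eq_true, beq_iff_eq]
      simp only [List.length_cons, List.length_nil]
      rw [if_pos (by simpa using hall), if_neg (by simp)]
      rfl
    · push_neg at hall
      obtain ⟨y, hy, hyx⟩ := hall
      have hlen : (PySem.Set.ofList (x :: t)).length ≠ 1 := by
        intro h1
        obtain ⟨z, hz⟩ := List.length_eq_one_iff.1 h1
        have hx' : x = z := by have := (hmem x).2 (by simp); simpa [hz] using this
        have hy' : y = z := by have := (hmem y).2 (by simp [hy]); simpa [hz] using this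
        exact hyx (hx'.symm ▸ hy')
      have hfalse : t.all (· == x) = false := by
        cases hv : t.all (· == x) with
        | false => rfl
        | true => exact absurd (by simpa [beq_iff_eq] using (List.all_eq_true.1 hv) y hy) hyx
      show pvAllEq t (some x) = _
      rw [pvAllEq_some, hfalse]
      simp [hlen]

lemma pvScanB_eq (whole part2 sw : List String) (i : Int) (idxs : List Int) (acc : Option String) :
    pvScanB whole part2 sw i idxs acc
      = pvAllEq ((idxs.filter (fun j => !(PySem.List.pyGetD sw (i + j) "" == ""))).map
          (fun j => PySem.Str.slice (PySem.List.pyGetD whole (i + j) "") none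
            (some (PySem.Str.len (PySem.List.pyGetD whole (i + j) "")
                   - PySem.Str.len (PySem.List.pyGetD part2 j ""))))) acc := by
  induction idxs generalizing acc with
  | nil => simp [pvScanB, pvAllEq]
  | cons j rest ih =>
    by_cases hsk : PySem.List.pyGetD sw (i + j) "" == ""
    · simp [pvScanB, hsk, ih]
    · cases acc with
      | none => simp [pvScanB, hsk, pvAllEq, ih]
      | some a =>
        simp only [pvScanB, hsk, Bool.false_eq_true, if_false, List.filter_cons,
          Bool.not_false, if_true, List.map_cons, pvAllEq]
        split
        · exact ih (some a)
        · rfl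

-- the emitted output, shared shape of both loops' success branch
def pvEmit (whole repl : List String) (m i : Int) (add : String) : Option String :=
  some (PySem.Str.join ""
    (PySem.List.slice whole none (some i)
      ++ repl.map (fun r => if !(PySem.Str.strip r == "") then PySem.Str.join "" [add, r] else r)
      ++ PySem.List.slice whole (some (i + m)) none))

def pvG (whole part repl : List String) (i : Int) : Option String :=
  match pvMatchA (PySem.List.slice whole (some i) (some (i + (part.length : Int)))) part with
  | none => none
  | some add => pvEmit whole repl (part.length : Int) i add

def pvH (whole part2 repl2 sp sw : List String) (m n : Nat) (i : Int) : Option String :=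
  if i + (m : Int) > (n : Int) then none
  else if !(PySem.List.slice sw (some (i + 1)) (some (i + (m : Int))) == PySem.List.slice sp (some 1) none) then none
  else
    match pvScanB whole part2 sw i (PySem.List.pyRange 0 (m : Int) 1) none with
    | none => none
    | some add => pvEmit whole repl2 (m : Int) i add

lemma pvLoopA_eq (whole part repl : List String) (idxs : List Int) :
    pvLoopA whole part repl idxs = idxs.findSome? (pvG whole part repl) := by
  induction idxs with
  | nil => simp [pvLoopA]
  | cons i rest ih =>
    rw [pvLoopA, List.findSome?_cons]
    cases h : pvMatchA (PySem.List.slice whole (some i) (some (i + (part.length : Int)))) part with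
    | none =>
      have hg : pvG whole part repl i = none := by simp only [pvG, h]
      simp only [h, hg]
      exact ih
    | some add =>
      have hg : pvG whole part repl i = pvEmit whole repl (part.length : Int) i add := by
        simp only [pvG, h]
      simp only [h, hg, pvEmit]

lemma pvLoopB_eq (whole part2 repl2 sp sw : List String) (m n : Nat) (idxs : List Int) :
    pvLoopB whole part2 repl2 sp sw m n idxs = idxs.findSome? (pvH whole part2 repl2 sp sw m n) := by
  induction idxs with
  | nil => simp [pvLoopB]
  | cons i rest ih =>
    rw [pvLoopB, List.findSome?_cons]
    by_cases h1 : i + (m : Int) > (n : Int)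
    · have hh : pvH whole part2 repl2 sp sw m n i = none := by rw [pvH, if_pos h1]
      rw [if_pos h1, hh]
      exact ih
    · by_cases h2 : (!(PySem.List.slice sw (some (i + 1)) (some (i + (m : Int))) == PySem.List.slice sp (some 1) none)) = true
      · have hh : pvH whole part2 repl2 sp sw m n i = none := by
          rw [pvH, if_neg h1, if_pos h2]
        rw [if_neg h1, if_pos h2, hh]
        exact ih
      · cases h3 : pvScanB whole part2 sw i (PySem.List.pyRange 0 (m : Int) 1) none with
        | none =>
          have hh : pvH whole part2 repl2 sp sw m n i = none := by
            rw [pvH, if_neg h1, if_neg h2]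
            simp only [h3]
          rw [if_neg h1, if_neg h2, hh]
          simp only [h3]
          exact ih
        | some add =>
          have hh : pvH whole part2 repl2 sp sw m n i = pvEmit whole repl2 (m : Int) i add := by
            rw [pvH, if_neg h1, if_neg h2]
            simp only [h3]
          rw [if_neg h1, if_neg h2, hh]
          simp only [h3, pvEmit]

lemma pv_findSome?_filter {α β : Type} (l : List α) (p : α → Bool) (f : α → Option β) :
    (l.filter p).findSome? f = l.findSome? (fun a => if p a then f a else none) := by
  induction l with
  | nil => rfl
  | cons x rest ih =>
    by_cases h : p x
    · simp [List.filter_cons, h, List.findSome?_cons, ih]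
    · simp [List.filter_cons, h, List.findSome?_cons, ih]

lemma pv_findSome?_congr {α β : Type} {l : List α} {f g : α → Option β}
    (h : ∀ a ∈ l, f a = g a) : l.findSome? f = l.findSome? g := by
  induction l with
  | nil => rfl
  | cons x rest ih =>
    rw [List.findSome?_cons, List.findSome?_cons, h x (by simp),
      ih (fun a ha => h a (by simp [ha]))]

-- the candidate list B reads back from its dict equals the filtered position range
lemma pv_cands (sw : List String) (c : String) :
    ((PySem.List.enumerate sw 0).foldl (fun d p => d.modify p.2 [] (· ++ [p.1]))
        (PySem.Dict.empty : PySem.Dict String (List Int))).getD c []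
      = (PySem.List.pyRange 0 (sw.length : Int) 1).filter
          (fun j => PySem.List.pyGetD sw j "" == c) := by
  have hswap : (PySem.List.enumerate sw 0).foldl (fun d p => d.modify p.2 [] (· ++ [p.1]))
      (PySem.Dict.empty : PySem.Dict String (List Int))
      = ((PySem.List.enumerate sw 0).map Prod.swap).foldl (fun d p => d.modify p.1 [] (· ++ [p.2]))
        (PySem.Dict.empty : PySem.Dict String (List Int)) := by
    rw [List.foldl_map]
    rfl
  rw [hswap, PySem.Dict.getD_foldl_modify_append]
  rw [PySem.List.enumerate_eq_map_pyRange sw ""]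
  simp only [List.map_map, List.filter_map, List.map_map, Function.comp_def, Prod.swap_prod_mk]
  simp [PySem.List.len]

-- central window lemma: A's helper on the i-th window computes exactly B's per-candidate check
lemma pv_window (whole part2 : List String) (i : Int)
    (h0 : 0 ≤ i) (h1 : i + (part2.length : Int) ≤ (whole.length : Int)) (hm : 1 ≤ part2.length) :
    pvMatchA (PySem.List.slice whole (some i) (some (i + (part2.length : Int)))) part2
      = (if PySem.List.pyGetD (whole.map (fun w => PySem.Str.lstrip w)) i ""
             == PySem.List.pyGetD (part2.map (fun p => PySem.Str.lstrip p)) 0 "" then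
          (if !(PySem.List.slice (whole.map (fun w => PySem.Str.lstrip w)) (some (i + 1)) (some (i + (part2.length : Int)))
                == PySem.List.slice (part2.map (fun p => PySem.Str.lstrip p)) (some 1) none) then none
           else pvScanB whole part2 (whole.map (fun w => PySem.Str.lstrip w)) i
                  (PySem.List.pyRange 0 (part2.length : Int) 1) none)
         else none) := by
  obtain ⟨iN, rfl⟩ := Int.eq_ofNat_of_zero_le h0
  set L := part2.length with hLdef
  set sw := whole.map (fun w => PySem.Str.lstrip w) with hswdef
  set sp := part2.map (fun p => PySem.Str.lstrip p) with hspdef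
  have hL : iN + L ≤ whole.length := by exact_mod_cast h1
  have hswlen : sw.length = whole.length := by simp [hswdef]
  have hsplen : sp.length = L := by simp [hspdef, hLdef]
  have hwl : PySem.List.slice whole (some (iN : Int)) (some ((iN : Int) + (L : Int)))
      = (whole.drop iN).take L := PySem.List.slice_natCast_add whole iN L
  set wl := (whole.drop iN).take L with hwldef
  have hwlen : wl.length = L := by rw [hwldef]; simp; omega
  have hget : ∀ k, k < L → wl[k]? = whole[iN + k]? := by
    intro k hk
    rw [hwldef, List.getElem?_take_of_lt hk, List.getElem?_drop]
  have hgetD : ∀ k, k < L → wl.getD k "" = whole.getD (iN + k) "" := by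
    intro k hk
    rw [List.getD_eq_getElem?_getD, List.getD_eq_getElem?_getD, hget k hk]
  have hget' : ∀ k, k < L → PySem.List.pyGetD wl (k : Int) ""
      = PySem.List.pyGetD whole ((iN : Int) + (k : Int)) "" := by
    intro k hk
    rw [show (iN : Int) + (k : Int) = ((iN + k : Nat) : Int) by push_cast; ring]
    rw [PySem.List.pyGetD_natCast, PySem.List.pyGetD_natCast, hgetD k hk]
  have hswAt : ∀ j, j < whole.length → sw[j]? = some (PySem.Str.lstrip (whole.getD j "")) := by
    intro j hj
    rw [hswdef, List.getElem?_map, List.getD_eq_getElem?_getD,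
      List.getElem?_eq_getElem (l := whole) (i := j) hj]
    rfl
  have hspAt : ∀ k, k < L → sp[k]? = some (PySem.Str.lstrip (part2.getD k "")) := by
    intro k hk
    rw [hspdef, List.getElem?_map, List.getD_eq_getElem?_getD,
      List.getElem?_eq_getElem (l := part2) (i := k) (by omega)]
    rfl
  have hswD : ∀ j, j < whole.length →
      PySem.List.pyGetD sw (j : Int) "" = PySem.Str.lstrip (PySem.List.pyGetD whole (j : Int) "") := by
    intro j hj
    rw [PySem.List.pyGetD_natCast, PySem.List.pyGetD_natCast,
      List.getD_eq_getElem?_getD, hswAt j hj]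
    rfl
  -- the per-line agreement proposition
  set P : Nat → Prop := fun k =>
    PySem.Str.lstrip (whole.getD (iN + k) "") = PySem.Str.lstrip (part2.getD k "") with hPdef
  have hall : ((PySem.List.pyRange 0 ((wl.length : Nat) : Int) 1).all (fun q =>
        PySem.Str.lstrip (PySem.List.pyGetD wl q "") == PySem.Str.lstrip (PySem.List.pyGetD part2 q ""))) = true
      ↔ ∀ k, k < L → P k := by
    rw [hwlen, PySem.List.pyRange_zero_nat, List.all_map, List.all_eq_true]
    constructor
    · intro h k hk
      have := h k (List.mem_range.2 hk)
      simp only [Function.comp_apply, beq_iff_eq, PySem.List.pyGetD_natCast,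
        List.getD_eq_getElem?_getD] at this
      rw [hget k hk] at this
      simp only [hPdef, List.getD_eq_getElem?_getD]
      exact this
    · intro h k hk
      have hk' := List.mem_range.1 hk
      simp only [Function.comp_apply, beq_iff_eq, PySem.List.pyGetD_natCast,
        List.getD_eq_getElem?_getD]
      rw [hget k hk']
      have := h k hk'
      simp only [hPdef, List.getD_eq_getElem?_getD] at this
      exact this
  have hc1 : (PySem.List.pyGetD sw ((iN : Nat) : Int) "" == PySem.List.pyGetD sp 0 "") = true ↔ P 0 := by
    rw [beq_iff_eq, hswD iN (by omega), PySem.List.pyGetD_zero,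
      List.getD_eq_getElem?_getD (l := sp), hspAt 0 (by omega), PySem.List.pyGetD_natCast]
    simp [hPdef]
  have hslice2 : PySem.List.slice sw (some ((iN : Int) + 1)) (some ((iN : Int) + (L : Int)))
      = (sw.drop (iN + 1)).take (L - 1) := by
    rw [PySem.List.slice_toNat sw (by omega) (by omega)]
    congr 1 <;> omega
  have hslice3 : PySem.List.slice sp (some 1) none = sp.drop 1 := by
    rw [PySem.List.slice_from sp (by omega)]
    norm_num
  have hc2 : (PySem.List.slice sw (some ((iN : Int) + 1)) (some ((iN : Int) + (L : Int)))
        == PySem.List.slice sp (some 1) none) = true ↔ ∀ k, k < L - 1 → P (k + 1) := by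
    rw [beq_iff_eq, hslice2, hslice3]
    have hlen1 : ((sw.drop (iN + 1)).take (L - 1)).length = L - 1 := by simp [hswlen]; omega
    have hlen2 : (sp.drop 1).length = L - 1 := by simp [hsplen]
    constructor
    · intro h k hk
      have := congrArg (fun l => l[k]?) h
      simp only at this
      rw [List.getElem?_take_of_lt hk, List.getElem?_drop, List.getElem?_drop,
        hswAt (iN + 1 + k) (by omega), hspAt (1 + k) (by omega)] at this
      have h2 := Option.some.inj this
      simpa [hPdef, Nat.add_comm 1 k, show iN + (k + 1) = iN + 1 + k by omega] using h2
    · intro h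
      apply List.ext_getElem?
      intro k
      by_cases hk : k < L - 1
      · rw [List.getElem?_take_of_lt hk, List.getElem?_drop, List.getElem?_drop,
          hswAt (iN + 1 + k) (by omega), hspAt (1 + k) (by omega)]
        have := h k hk
        simp only [hPdef] at this
        rw [show iN + 1 + k = iN + (k + 1) by omega, show 1 + k = k + 1 by omega, this]
      · rw [List.getElem?_eq_none (by omega), List.getElem?_eq_none (by omega)]
  have hPsplit : (∀ k, k < L → P k) ↔ (P 0 ∧ ∀ k, k < L - 1 → P (k + 1)) := by
    constructor
    · intro h
      exact ⟨h 0 (by omega), fun k hk => h (k + 1) (by omega)⟩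
    · rintro ⟨hp0, hrest⟩ k hk
      cases k with
      | zero => exact hp0
      | succ k' => exact hrest k' (by omega)
  -- assemble
  rw [hwl]
  by_cases hP : ∀ k, k < L → P k
  · have hallb : ((PySem.List.pyRange 0 ((wl.length : Nat) : Int) 1).all (fun q =>
        PySem.Str.lstrip (PySem.List.pyGetD wl q "") == PySem.Str.lstrip (PySem.List.pyGetD part2 q ""))) = true := hall.2 hP
    have hc1b := hc1.2 (hPsplit.1 hP).1
    have hc2b := hc2.2 (hPsplit.1 hP).2
    have hf : ∀ q ∈ PySem.List.pyRange 0 ((L : Nat) : Int) 1,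
        (!(PySem.Str.strip (PySem.List.pyGetD wl q "") == ""))
          = (!(PySem.List.pyGetD sw ((iN : Int) + q) "" == "")) := by
      intro q hq
      obtain ⟨hq0, hqL⟩ := PySem.List.mem_pyRange_one.1 hq
      obtain ⟨k, rfl⟩ := Int.eq_ofNat_of_zero_le hq0
      have hkL : k < L := by exact_mod_cast hqL
      rw [hget' k hkL, show (iN : Int) + (k : Int) = ((iN + k : Nat) : Int) by push_cast; ring,
        pv_strip_empty, ← hswD (iN + k) (by omega)]
    have hAB : (((PySem.List.pyRange 0 ((wl.length : Nat) : Int) 1).filter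
          (fun i => !(PySem.Str.strip (PySem.List.pyGetD wl i "") == ""))).map
          (fun i => PySem.Str.slice (PySem.List.pyGetD wl i "") none
            (some (PySem.Str.len (PySem.List.pyGetD wl i "")
                   - PySem.Str.len (PySem.List.pyGetD part2 i "")))))
        = (((PySem.List.pyRange 0 ((L : Nat) : Int) 1).filter
          (fun j => !(PySem.List.pyGetD sw ((iN : Int) + j) "" == ""))).map
          (fun j => PySem.Str.slice (PySem.List.pyGetD whole ((iN : Int) + j) "") none
            (some (PySem.Str.len (PySem.List.pyGetD whole ((iN : Int) + j) "")
                   - PySem.Str.len (PySem.List.pyGetD part2 j ""))))) := by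
      rw [hwlen, List.filter_congr hf]
      apply List.map_congr_left
      intro q hq
      have hq' := (List.mem_filter.1 hq).1
      obtain ⟨hq0, hqL⟩ := PySem.List.mem_pyRange_one.1 hq'
      obtain ⟨k, rfl⟩ := Int.eq_ofNat_of_zero_le hq0
      have hkL : k < L := by exact_mod_cast hqL
      rw [hget' k hkL]
    simp only [pvMatchA, hallb, Bool.not_true, Bool.false_eq_true, if_false, hc1b, if_true,
      hc2b, Bool.not_true, Bool.false_eq_true, if_false]
    rw [pvScanB_eq, pvAllEq_set, hAB]
  · have hallb : ((PySem.List.pyRange 0 ((wl.length : Nat) : Int) 1).all (fun q =>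
        PySem.Str.lstrip (PySem.List.pyGetD wl q "") == PySem.Str.lstrip (PySem.List.pyGetD part2 q ""))) = false := by
      cases hv : (PySem.List.pyRange 0 ((wl.length : Nat) : Int) 1).all (fun q =>
        PySem.Str.lstrip (PySem.List.pyGetD wl q "") == PySem.Str.lstrip (PySem.List.pyGetD part2 q "")) with
      | false => rfl
      | true => exact absurd (hall.1 hv) hP
    simp only [pvMatchA, hallb, Bool.not_false, if_true]
    by_cases hc1b : (PySem.List.pyGetD sw ((iN : Nat) : Int) "" == PySem.List.pyGetD sp 0 "") = true
    · have hc2b : (PySem.List.slice sw (some ((iN : Int) + 1)) (some ((iN : Int) + (L : Int)))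
          == PySem.List.slice sp (some 1) none) = false := by
        cases hv : (PySem.List.slice sw (some ((iN : Int) + 1)) (some ((iN : Int) + (L : Int)))
            == PySem.List.slice sp (some 1) none) with
        | false => rfl
        | true =>
          exact absurd (hPsplit.2 ⟨hc1.1 hc1b, hc2.1 hv⟩) hP
      simp [hc1b, hc2b]
    · simp [Bool.not_eq_true] at hc1b
      simp [hc1b]

-- m = 0 : every window is [] and A's helper rejects it
lemma pv_matchA_nil (whole : List String) (i : Int) (h0 : 0 ≤ i) :
    pvMatchA (PySem.List.slice whole (some i) (some (i + (([] : List String).length : Int)))) ([] : List String) = none := by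
  simp only [List.length_nil, Nat.cast_zero, add_zero]
  rw [PySem.List.slice_toNat whole h0 h0]
  simp [pvMatchA]

lemma pvLoopA_nil (whole r2 : List String) :
    ∀ idxs : List Int, (∀ i ∈ idxs, 0 ≤ i) → pvLoopA whole [] r2 idxs = none
  | [], _ => rfl
  | i :: rest, h => by
    rw [pvLoopA, pv_matchA_nil whole i (h i (by simp))]
    exact pvLoopA_nil whole r2 rest (fun j hj => h j (by simp [hj]))

-- main core: with the SAME outdented part/replace lists, the two searches agree
lemma pv_core (whole p2 r2 : List String) :
    pvLoopA whole p2 r2 (PySem.List.pyRange 0 ((whole.length : Int) - (p2.length : Int) + 1) 1)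
      = (if p2.length == 0 || p2.length > whole.length then none
         else
          pvLoopB whole p2 r2 (p2.map (fun p => PySem.Str.lstrip p)) (whole.map (fun w => PySem.Str.lstrip w))
            p2.length whole.length
            (((PySem.List.enumerate (whole.map (fun w => PySem.Str.lstrip w)) 0).foldl
                (fun d p => d.modify p.2 [] (· ++ [p.1])) PySem.Dict.empty).getD
              (PySem.List.pyGetD (p2.map (fun p => PySem.Str.lstrip p)) 0 "") [])) := by
  by_cases hm0 : p2.length = 0
  · obtain rfl := List.eq_nil_of_length_eq_zero hm0
    rw [pvLoopA_nil whole r2 _ (fun i hi => (PySem.List.mem_pyRange_one.1 hi).1)]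
    simp
  · by_cases hmn : whole.length < p2.length
    · rw [PySem.List.pyRange_one_eq_nil (by push_cast; omega)]
      rw [show pvLoopA whole p2 r2 [] = none from rfl]
      rw [if_pos (by simp [hmn])]
    · have hm1 : 1 ≤ p2.length := by omega
      have hmn' : p2.length ≤ whole.length := by omega
      rw [if_neg (by
        simp only [Bool.or_eq_true, beq_iff_eq, decide_eq_true_eq, not_or]
        exact ⟨hm0, by omega⟩)]
      rw [pvLoopA_eq, pvLoopB_eq, pv_cands, pv_findSome?_filter]
      simp only [List.length_map]
      rw [PySem.List.pyRange_one_append 0 ((whole.length : Int) - (p2.length : Int) + 1)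
        ((whole.length : Int) : Int) (by omega) (by omega)]
      rw [List.findSome?_append]
      have h2 : ((PySem.List.pyRange ((whole.length : Int) - (p2.length : Int) + 1) (whole.length : Int) 1).findSome?
          (fun a => if PySem.List.pyGetD (whole.map (fun w => PySem.Str.lstrip w)) a ""
              == PySem.List.pyGetD (p2.map (fun p => PySem.Str.lstrip p)) 0 "" then
            pvH whole p2 r2 (p2.map (fun p => PySem.Str.lstrip p)) (whole.map (fun w => PySem.Str.lstrip w))
              p2.length whole.length a
          else none)) = none := by
        apply List.findSome?_eq_none_iff.mpr
        intro x hx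
        obtain ⟨hx1, hx2⟩ := PySem.List.mem_pyRange_one.1 hx
        have hH : pvH whole p2 r2 (p2.map (fun p => PySem.Str.lstrip p)) (whole.map (fun w => PySem.Str.lstrip w))
            p2.length whole.length x = none := by
          rw [pvH, if_pos (by push_cast; omega)]
        simp [hH]
      rw [h2, Option.or_none]
      apply pv_findSome?_congr
      intro a ha
      obtain ⟨ha0, haU⟩ := PySem.List.mem_pyRange_one.1 ha
      simp only [pvG]
      rw [pv_window whole p2 a ha0 (by push_cast at haU ⊢; omega) (by omega)]
      by_cases hc1 : (PySem.List.pyGetD (whole.map (fun w => PySem.Str.lstrip w)) a ""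
          == PySem.List.pyGetD (p2.map (fun p => PySem.Str.lstrip p)) 0 "") = true
      · simp only [hc1, if_true]
        rw [pvH, if_neg (show ¬((whole.length : Int) < a + (p2.length : Int)) by push_cast at haU ⊢; omega)]
        by_cases h2b : (PySem.List.slice (whole.map (fun w => PySem.Str.lstrip w)) (some (a + 1))
              (some (a + (p2.length : Int)))
            == PySem.List.slice (p2.map (fun p => PySem.Str.lstrip p)) (some 1) none) = true
        · simp only [h2b, Bool.not_true, Bool.false_eq_true, if_false]
        · rw [Bool.not_eq_true] at h2b
          simp [h2b]
      · rw [Bool.not_eq_true] at hc1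
        simp [hc1]

-- ===== VERDICT (by name: the statement is the Claim_ definition above) =====
theorem replace_part_with_missing_leading_whitespace_spec : Claim_equal_replace_part_with_missing_leading_whitespace := by
  intro whole_lines part_lines replace_lines _hdom
  unfold Spec_replace_part_with_missing_leading_whitespace
  unfold replace_part_with_missing_leading_whitespace replace_part_with_missing_leading_whitespace_alt
  dsimp only
  rw [List.filter_append, List.map_append]
  cases hmin : PySem.List.min? ((part_lines.filter (fun p => !(PySem.Str.strip p == ""))).map
        (fun p => PySem.Str.len p - PySem.Str.len (PySem.Str.lstrip p))
      ++ (replace_lines.filter (fun p => !(PySem.Str.strip p == ""))).map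
        (fun p => PySem.Str.len p - PySem.Str.len (PySem.Str.lstrip p))) (fun x => x) with
  | none =>
    simp only
    exact pv_core whole_lines part_lines replace_lines
  | some v =>
    simp only
    by_cases hv : v ≠ 0
    · rw [if_pos hv, if_pos hv, if_pos hv]
      exact pv_core whole_lines _ _
    · rw [if_neg hv, if_neg hv, if_neg hv]
      exact pv_core whole_lines part_lines replace_lines
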